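-- pv_equiv track=rewrite | github.com/ValachPatrik/miniprojects-highschool-year2 | klient_centrum_V1_Valach.py | vypis
-- ===== SOURCE A (Python) =====
-- def vypis(x):
--     x = str(x)
--     if ('6' in x or '9' in x or '8' in x or '0' in x) and \
--             all(j not in x for j in '123457') and \
--             (x[-1] != '0'):
--         y = x[::-1]
--         for j in range(len(y)):
--             if y[j] == '6':
--                 y = y[:j] + '9' + y[j+1:]
--             elif y[j] == '9':
--                 y = y[:j] + '6' + y[j+1:]
--         if x != y:
--             return f'{x}.'
--     return ''
-- ===== SOURCE B (Python) =====
-- def vypis(x):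
--     x = str(x)
--     if ('6' in x or '9' in x or '8' in x or '0' in x) and \
--             all(j not in x for j in '123457') and \
--             (x[-1] != '0'):
--         n = len(x)
--         mismatch = False
--         for i in range(n):
--             c = x[n - 1 - i]
--             d = '9' if c == '6' else '6' if c == '9' else c
--             if x[i] != d:
--                 mismatch = True
--         if mismatch:
--             return f'{x}.'
--     return ''
-- ===== Notes on version B (the rewrite author's own statement) =====
-- stated objective: alternative
-- what changed: B never materializes the reversed/6-9-swapped string: instead of A's slice-and-rebuild loop over y = x[::-1], B does a single two-pointer scan comparing x[i] with the 6/9-swap of x[n-1-i] and flags any mismatch.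
import Mathlib
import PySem

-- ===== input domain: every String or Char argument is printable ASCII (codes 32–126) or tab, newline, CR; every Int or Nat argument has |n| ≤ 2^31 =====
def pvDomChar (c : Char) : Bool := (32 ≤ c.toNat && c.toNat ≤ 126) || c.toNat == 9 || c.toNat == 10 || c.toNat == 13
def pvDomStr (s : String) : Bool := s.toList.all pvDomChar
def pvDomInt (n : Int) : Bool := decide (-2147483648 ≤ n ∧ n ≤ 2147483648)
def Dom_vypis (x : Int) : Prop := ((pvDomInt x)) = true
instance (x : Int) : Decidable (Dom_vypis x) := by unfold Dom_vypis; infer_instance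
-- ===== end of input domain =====

-- B replaces A's slice-and-rebuild loop over the materialized reversal y = x[::-1] by a single
-- two-pointer scan comparing x[i] with the 6/9-swap of x[n-1-i]; same return value everywhere.

-- ===== PORT A =====
-- the shared guard of both Pythons: digits from {0,6,8,9} only, at least one of 6/9/8/0, last char ≠ '0'
def pvGuard (xs : List Char) : Bool :=
  (xs.contains '6' || xs.contains '9' || xs.contains '8' || xs.contains '0')
    && (("123457".toList).all (fun j => !(xs.contains j)))
    && decide (PySem.List.pyGet? xs (-1) ≠ some '0')

-- one iteration of A's for-loop body: y = y[:j] + '9' + y[j+1:]  (resp. '6')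
def pvStepA (y : List Char) (j : Int) : List Char :=
  if PySem.List.pyGet? y j = some '6' then
    PySem.List.slice y none (some j) ++ '9' :: PySem.List.slice y (some (j + 1)) none
  else if PySem.List.pyGet? y j = some '9' then
    PySem.List.slice y none (some j) ++ '6' :: PySem.List.slice y (some (j + 1)) none
  else y

def vypis (x : Int) : String :=
  let s := PySem.Int.toStr x
  let xs := s.toList
  if pvGuard xs then
    let y0 := (PySem.List.slice? xs none none (-1)).getD []   -- x[::-1]; always some
    let y := (PySem.List.pyRange 0 (y0.length : Int)).foldl pvStepA y0
    if xs ≠ y then s ++ "." else ""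
  else ""

-- ===== PORT B =====
-- one iteration of B's scan: d = swap of x[n-1-i]; mismatch if x[i] != d
def pvStepB (xs : List Char) (n : Nat) (m : Bool) (i : Int) : Bool :=
  let c := PySem.List.pyGetD xs ((n : Int) - 1 - i) ' '
  let d := if c = '6' then '9' else if c = '9' then '6' else c
  if PySem.List.pyGetD xs i ' ' ≠ d then true else m

def vypis_alt (x : Int) : String :=
  let s := PySem.Int.toStr x
  let xs := s.toList
  if pvGuard xs then
    let n := xs.length
    let mismatch := (PySem.List.pyRange 0 (n : Int)).foldl (pvStepB xs n) false
    if mismatch then s ++ "." else ""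
  else ""

-- ===== PRECONDITION & SPEC =====
def Spec_vypis (x : Int) (out : String) : Prop := out = vypis_alt x
instance (x : Int) (out : String) : Decidable (Spec_vypis x out) := by unfold Spec_vypis; infer_instance

-- ===== CLAIM (what is proved, stated in full; the proofs are below) =====
def Claim_equal_vypis : Prop := ∀ (x : Int), Dom_vypis x → Spec_vypis x (vypis x)

-- ===== LEMMAS AND PROOFS =====

def pvSwap (c : Char) : Char := if c = '6' then '9' else if c = '9' then '6' else c

-- invariant of A's loop: after the first k iterations the first k chars are swapped, the rest untouched
theorem pvFoldA_inv (y0 : List Char) (k : Nat) (hk : k ≤ y0.length) :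
    (List.range k).foldl (fun (y : List Char) (j : Nat) => pvStepA y (j : Int)) y0
      = (y0.take k).map pvSwap ++ y0.drop k := by
  induction k with
  | zero => simp
  | succ k ih =>
    have hk' : k ≤ y0.length := Nat.le_of_succ_le hk
    have hklt : k < y0.length := hk
    rw [List.range_succ, List.foldl_append, ih hk']
    set M := (y0.take k).map pvSwap with hM
    have hMlen : M.length = k := by
      simp [hM, List.length_take, Nat.min_eq_left hk']
    have hdrop : y0.drop k = y0[k] :: y0.drop (k + 1) := by
      rw [List.drop_eq_getElem_cons hklt]
    rw [hdrop]
    have hget : PySem.List.pyGet? (M ++ y0[k] :: y0.drop (k + 1)) ((k : Int)) = some y0[k] := by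
      have h := PySem.List.pyGet?_append_length M (y0.drop (k + 1)) y0[k]
      rwa [hMlen] at h
    have hsliceL : PySem.List.slice (M ++ y0[k] :: y0.drop (k + 1)) none (some ((k : Int)))
        = M := by
      have h := PySem.List.slice_to_natCast (M ++ y0[k] :: y0.drop (k + 1)) M.length
      rw [List.take_left] at h
      rwa [hMlen] at h
    have hsliceR : PySem.List.slice (M ++ y0[k] :: y0.drop (k + 1)) (some ((k : Int) + 1)) none
        = y0.drop (k + 1) := by
      have hc : ((k : Int) + 1) = ((k + 1 : Nat) : Int) := by push_cast; ring
      rw [hc, PySem.List.slice_from_natCast]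
      have h2 : M ++ y0[k] :: y0.drop (k + 1) = (M ++ [y0[k]]) ++ y0.drop (k + 1) := by simp
      have h3 : (M ++ [y0[k]]).length = k + 1 := by simp [hMlen]
      rw [h2, ← h3, List.drop_left]
    have htake : y0.take (k + 1) = y0.take k ++ [y0[k]] := List.take_succ_eq_append_getElem hklt
    simp only [List.foldl_cons, List.foldl_nil, pvStepA, hget, Option.some.injEq]
    rw [htake, List.map_append]
    by_cases h6 : y0[k] = '6'
    · rw [if_pos h6, hsliceL, hsliceR]
      simp [hM, pvSwap, h6, List.map_take]
    · rw [if_neg h6]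
      by_cases h9 : y0[k] = '9'
      · rw [if_pos h9, hsliceL, hsliceR]
        simp [hM, pvSwap, h9, List.map_take]
      · rw [if_neg h9]
        simp [hM, pvSwap, h6, h9, List.map_take]

theorem pvFoldA_eq_map (y0 : List Char) :
    (PySem.List.pyRange 0 (y0.length : Int)).foldl pvStepA y0 = y0.map pvSwap := by
  rw [PySem.List.pyRange_zero_nat, List.foldl_map, pvFoldA_inv y0 y0.length (le_refl _)]
  simp

-- one step of B's scan as a boolean 'or'
theorem pvStepB_eq (xs : List Char) (n : Nat) (m : Bool) (i : Int) :
    pvStepB xs n m i = (m || decide (PySem.List.pyGetD xs i ' '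
      ≠ pvSwap (PySem.List.pyGetD xs ((n : Int) - 1 - i) ' '))) := by
  show (if PySem.List.pyGetD xs i ' '
      ≠ pvSwap (PySem.List.pyGetD xs ((n : Int) - 1 - i) ' ') then true else m) = _
  by_cases h : PySem.List.pyGetD xs i ' '
      ≠ pvSwap (PySem.List.pyGetD xs ((n : Int) - 1 - i) ' ')
  · simp [h]
  · simp [h]

-- B's accumulator fold is an 'any'
theorem pvFoldB_any (xs : List Char) (n : Nat) (l : List Int) (m : Bool) :
    l.foldl (pvStepB xs n) m
      = (m || l.any (fun i => decide (PySem.List.pyGetD xs i ' '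
          ≠ pvSwap (PySem.List.pyGetD xs ((n : Int) - 1 - i) ' ')))) := by
  induction l generalizing m with
  | nil => simp
  | cons a l ih =>
    simp only [List.foldl_cons, List.any_cons, pvStepB_eq, ih]
    cases m <;> simp

-- pointwise value of the swapped reversal
theorem pvPoint (xs : List Char) (k : Nat) (hk : k < xs.length) :
    (xs.reverse.map pvSwap).getD k ' ' = pvSwap (xs.getD (xs.length - 1 - k) ' ') := by
  have hkr : k < (xs.reverse.map pvSwap).length := by simpa using hk
  have hk2 : xs.length - 1 - k < xs.length := by omega
  rw [List.getD_eq_getElem _ _ hkr, List.getD_eq_getElem _ _ hk2]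
  simp [List.getElem_reverse]

-- B's mismatch flag decides exactly 'xs ≠ map swap (reverse xs)'
theorem pvMismatch_iff (xs : List Char) :
    ((PySem.List.pyRange 0 (xs.length : Int)).foldl (pvStepB xs xs.length) false = true)
      ↔ xs ≠ xs.reverse.map pvSwap := by
  rw [pvFoldB_any, PySem.List.pyRange_zero_nat]
  simp only [Bool.false_or, List.any_map, List.any_eq_true, List.mem_range,
    Function.comp, decide_eq_true_eq, PySem.List.pyGetD_natCast]
  constructor
  · rintro ⟨k, hk, hP⟩ hx
    apply hP
    have hcast : ((xs.length : Int) - 1 - (k : Int)) = ((xs.length - 1 - k : Nat) : Int) := by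
      omega
    rw [hcast, PySem.List.pyGetD_natCast, ← pvPoint xs k hk]
    exact congrArg (fun l => l.getD k ' ') hx
  · intro hne
    by_contra h
    push Not at h
    apply hne
    apply List.ext_getElem (by simp)
    intro k hk hk'
    have hkk := h k hk
    have hcast : ((xs.length : Int) - 1 - (k : Int)) = ((xs.length - 1 - k : Nat) : Int) := by
      omega
    rw [hcast, PySem.List.pyGetD_natCast, ← pvPoint xs k hk] at hkk
    rw [List.getD_eq_getElem _ _ hk, List.getD_eq_getElem _ _ hk'] at hkk
    exact hkk

-- guard-true branches agree
theorem pvCore (s : String) (xs : List Char) :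
    (if pvGuard xs then
       (if xs ≠ (PySem.List.pyRange 0
            ((((PySem.List.slice? xs none none (-1)).getD []).length : Nat) : Int)).foldl pvStepA
            ((PySem.List.slice? xs none none (-1)).getD []) then s ++ "." else "")
     else "")
    = (if pvGuard xs then
       (if (PySem.List.pyRange 0 ((xs.length : Nat) : Int)).foldl (pvStepB xs xs.length) false
          then s ++ "." else "")
     else "") := by
  by_cases hg : pvGuard xs = true
  · rw [if_pos hg, if_pos hg, PySem.List.slice?_none_none_neg_one, Option.getD_some,
      pvFoldA_eq_map]
    by_cases hne : xs ≠ xs.reverse.map pvSwap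
    · rw [if_pos hne, if_pos ((pvMismatch_iff xs).mpr hne)]
    · rw [if_neg hne, if_neg (by intro h; exact hne ((pvMismatch_iff xs).mp h))]
  · rw [if_neg hg, if_neg hg]

-- ===== VERDICT (by name: the statement is the Claim_ definition above) =====
theorem vypis_spec : Claim_equal_vypis := by
  intro x _
  unfold Spec_vypis vypis vypis_alt
  exact pvCore (PySem.Int.toStr x) (PySem.Int.toStr x).toList
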